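-- pv_equiv track=rewrite | github.com/pbmendoza/mta_ridership | api_data_download/download.py | merge_header
-- ===== SOURCE A (Python) =====
-- from typing import Dict, List, Optional, Sequence, Tuple
--
-- COLUMN_ORDER = [
--     "transit_timestamp",
--     "transit_mode",
--     "station_complex_id",
--     "station_complex",
--     "borough",
--     "payment_method",
--     "fare_class_category",
--     "ridership",
--     "transfers",
--     "latitude",
--     "longitude",
--     "georeference",
-- ]
--
-- def merge_header(seen_rows: Sequence[Dict[str, str]]) -> List[str]:
--     header: List[str] = []
--     for column in COLUMN_ORDER:
--         if any(column in row for row in seen_rows):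
--             header.append(column)
--     for row in seen_rows:
--         for key in row.keys():
--             if key.startswith(":") or key in header:
--                 continue
--             header.append(key)
--     return header
-- ===== SOURCE B (Python) =====
-- from typing import Dict, List, Sequence
--
-- COLUMN_ORDER = [
--     "transit_timestamp",
--     "transit_mode",
--     "station_complex_id",
--     "station_complex",
--     "borough",
--     "payment_method",
--     "fare_class_category",
--     "ridership",
--     "transfers",
--     "latitude",
--     "longitude",
--     "georeference",
-- ]
--
-- def merge_header(seen_rows: Sequence[Dict[str, str]]) -> List[str]:
--     # One indexing pass: collect every key once (set) and the extra keys in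
--     # first-appearance order; then filter COLUMN_ORDER by presence and append extras.
--     present = set()
--     extras: List[str] = []
--     for row in seen_rows:
--         for key in row.keys():
--             if key not in present:
--                 present.add(key)
--                 if not key.startswith(":") and key not in COLUMN_ORDER:
--                     extras.append(key)
--     return [c for c in COLUMN_ORDER if c in present] + extras
-- ===== Notes on version B (the rewrite author's own statement) =====
-- stated objective: faster
-- what changed: Replaces A's per-column any() scan over all rows and per-key linear 'key in header' list scan with a single indexing pass building a 'present' set and a deduplicated extras list, then a filter of COLUMN_ORDER plus the extras.
import Mathlib
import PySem

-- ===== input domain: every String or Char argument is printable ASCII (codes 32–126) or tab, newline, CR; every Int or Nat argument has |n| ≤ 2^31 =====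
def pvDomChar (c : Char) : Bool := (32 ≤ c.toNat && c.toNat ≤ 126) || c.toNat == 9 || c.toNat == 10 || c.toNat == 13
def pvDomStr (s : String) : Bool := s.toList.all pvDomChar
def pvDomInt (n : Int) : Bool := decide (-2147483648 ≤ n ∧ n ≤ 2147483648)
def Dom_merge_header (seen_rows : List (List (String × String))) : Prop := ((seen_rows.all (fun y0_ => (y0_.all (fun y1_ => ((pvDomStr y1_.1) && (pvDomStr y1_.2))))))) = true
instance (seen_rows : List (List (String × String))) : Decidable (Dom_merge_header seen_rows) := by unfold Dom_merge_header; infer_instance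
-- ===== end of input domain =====

-- B replaces A's per-column scan over all rows and the linear "key in header" dedup
-- with one indexing pass (a present-set plus an extras list) followed by a filter.


def pvCOLUMN_ORDER : List String :=
  ["transit_timestamp", "transit_mode", "station_complex_id", "station_complex",
   "borough", "payment_method", "fare_class_category", "ridership", "transfers",
   "latitude", "longitude", "georeference"]

-- ===== PORT A =====
def merge_header (seen_rows : List (List (String × String))) : List String :=
  let header : List String := pvCOLUMN_ORDER.foldl
    (fun header column =>
      if seen_rows.any (fun row => (PySem.Dict.ofList row).contains column)
      then header ++ [column] else header) []
  seen_rows.foldl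
    (fun header row =>
      (PySem.Dict.ofList row).keys.foldl
        (fun header key =>
          if PySem.Str.startswith key ":" || header.contains key then header
          else header ++ [key]) header) header

-- ===== PORT B =====
def merge_header_alt (seen_rows : List (List (String × String))) : List String :=
  let st : PySem.Set String × List String := seen_rows.foldl
    (fun st row =>
      (PySem.Dict.ofList row).keys.foldl
        (fun st key =>
          if PySem.Set.contains st.1 key then st
          else (PySem.Set.add st.1 key,
                if !PySem.Str.startswith key ":" && !pvCOLUMN_ORDER.contains key
                then st.2 ++ [key] else st.2)) st)
    (PySem.Set.empty, [])
  pvCOLUMN_ORDER.filter (fun c => PySem.Set.contains st.1 c) ++ st.2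

-- ===== PRECONDITION & SPEC =====
def Spec_merge_header (seen_rows : List (List (String × String))) (out : List String) : Prop := out = merge_header_alt seen_rows
instance (seen_rows : List (List (String × String))) (out : List String) : Decidable (Spec_merge_header seen_rows out) := by unfold Spec_merge_header; infer_instance

-- ===== CLAIM (what is proved, stated in full; the proofs are below) =====
def Claim_equal_merge_header : Prop := ∀ (seen_rows : List (List (String × String))), Dom_merge_header seen_rows → Spec_merge_header seen_rows (merge_header seen_rows)

-- ===== LEMMAS AND PROOFS =====

-- the key list phase 2 of both programs traverses (row keys in row order)
def pvAllKeys (seen_rows : List (List (String × String))) : List String :=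
  seen_rows.flatMap (fun row => (PySem.Dict.ofList row).keys)

-- "column in row for some row", the test of A's first loop
def pvPresent (seen_rows : List (List (String × String))) (c : String) : Bool :=
  seen_rows.any (fun row => (PySem.Dict.ofList row).contains c)

lemma pvPresent_iff_mem_allKeys (seen_rows : List (List (String × String))) (c : String) :
    pvPresent seen_rows c = true ↔ c ∈ pvAllKeys seen_rows := by
  simp [pvPresent, pvAllKeys, List.any_eq_true, List.mem_flatMap,
        PySem.Dict.contains_iff_mem_keys]

-- the present-set component of B's loop collects exactly the keys seen so far
lemma pres_fold (ks : List String) (pres : PySem.Set String) (e : List String) (j : String) :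
    j ∈ (ks.foldl
        (fun st key =>
          if PySem.Set.contains st.1 key then st
          else (PySem.Set.add st.1 key,
                if !PySem.Str.startswith key ":" && !pvCOLUMN_ORDER.contains key
                then st.2 ++ [key] else st.2)) (pres, e)).1
      ↔ j ∈ pres ∨ j ∈ ks := by
  induction ks generalizing pres e with
  | nil => simp
  | cons k t ih =>
    simp only [List.foldl_cons]
    by_cases hk : PySem.Set.contains pres k = true
    · rw [if_pos hk, ih]
      have := (PySem.Set.contains_iff pres k).mp hk
      constructor
      · rintro (h | h) <;> simp_all
      · rintro (h | h)
        · exact Or.inl h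
        · rcases List.mem_cons.mp h with rfl | h
          · exact Or.inl this
          · exact Or.inr h
    · rw [if_neg hk, ih]
      rw [PySem.Set.mem_add]
      constructor
      · rintro ((h | rfl) | h) <;> simp_all
      · rintro (h | h)
        · exact Or.inl (Or.inl h)
        · rcases List.mem_cons.mp h with rfl | h
          · exact Or.inl (Or.inr rfl)
          · exact Or.inr h

-- the common loop over the key stream: A's header loop, started at h0 ++ e, tracks
-- B's (present, extras) loop whenever e and the present set are related as below
lemma phase2_fold (seen_rows : List (List (String × String))) (ks : List String)
    (hks : ∀ k ∈ ks, k ∈ pvAllKeys seen_rows)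
    (pres : PySem.Set String) (e : List String)
    (hinv : ∀ j, j ∈ e ↔ j ∈ pres ∧ PySem.Str.startswith j ":" = false ∧ j ∉ pvCOLUMN_ORDER) :
    ks.foldl
      (fun header key =>
        if PySem.Str.startswith key ":" || header.contains key then header
        else header ++ [key])
      (pvCOLUMN_ORDER.filter (pvPresent seen_rows) ++ e)
    = pvCOLUMN_ORDER.filter (pvPresent seen_rows) ++
      (ks.foldl
        (fun st key =>
          if PySem.Set.contains st.1 key then st
          else (PySem.Set.add st.1 key,
                if !PySem.Str.startswith key ":" && !pvCOLUMN_ORDER.contains key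
                then st.2 ++ [key] else st.2)) (pres, e)).2 := by
  induction ks generalizing pres e with
  | nil => simp
  | cons k t ih =>
    have hkt : ∀ j ∈ t, j ∈ pvAllKeys seen_rows := fun j hj => hks j (List.mem_cons_of_mem _ hj)
    simp only [List.foldl_cons]
    by_cases hstart : PySem.Str.startswith k ":" = true
    · rw [if_pos (by rw [hstart]; simp)]
      by_cases hp : PySem.Set.contains pres k = true
      · rw [if_pos hp]; exact ih hkt pres e hinv
      · rw [if_neg hp, if_neg (by rw [hstart]; simp)]
        refine ih hkt _ e (fun j => ?_)
        rw [hinv j, PySem.Set.mem_add]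
        constructor
        · rintro ⟨h, h2, h3⟩; exact ⟨Or.inl h, h2, h3⟩
        · rintro ⟨h | rfl, h2, h3⟩
          · exact ⟨h, h2, h3⟩
          · rw [hstart] at h2; cases h2
    · have hstart' : PySem.Str.startswith k ":" = false := by
        cases h : PySem.Str.startswith k ":" <;> simp_all
      by_cases he : k ∈ e
      · have hmem : (pvCOLUMN_ORDER.filter (pvPresent seen_rows) ++ e).contains k = true :=
          List.contains_iff_mem.mpr (List.mem_append_right _ he)
        rw [if_pos (by rw [hmem]; simp)]
        have hp : PySem.Set.contains pres k = true :=
          (PySem.Set.contains_iff pres k).mpr ((hinv k).mp he).1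
        rw [if_pos hp]; exact ih hkt pres e hinv
      · by_cases hco : k ∈ pvCOLUMN_ORDER
        · -- k is a COLUMN_ORDER column, hence already in the h0 part of A's header
          have hkall : k ∈ pvAllKeys seen_rows := hks k List.mem_cons_self
          have hh0 : k ∈ pvCOLUMN_ORDER.filter (pvPresent seen_rows) :=
            List.mem_filter.mpr ⟨hco, (pvPresent_iff_mem_allKeys seen_rows k).mpr hkall⟩
          have hmem : (pvCOLUMN_ORDER.filter (pvPresent seen_rows) ++ e).contains k = true :=
            List.contains_iff_mem.mpr (List.mem_append_left _ hh0)
          have hcob : pvCOLUMN_ORDER.contains k = true := List.contains_iff_mem.mpr hco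
          rw [if_pos (by rw [hmem]; simp)]
          by_cases hp : PySem.Set.contains pres k = true
          · rw [if_pos hp]; exact ih hkt pres e hinv
          · rw [if_neg hp, if_neg (by rw [hcob]; simp)]
            refine ih hkt _ e (fun j => ?_)
            rw [hinv j, PySem.Set.mem_add]
            constructor
            · rintro ⟨h, h2, h3⟩; exact ⟨Or.inl h, h2, h3⟩
            · rintro ⟨h | rfl, h2, h3⟩
              · exact ⟨h, h2, h3⟩
              · exact absurd hco h3
        · -- a genuinely new extra key: both sides append it
          have hh0 : k ∉ pvCOLUMN_ORDER.filter (pvPresent seen_rows) :=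
            fun h => hco (List.mem_filter.mp h).1
          have hmem : (pvCOLUMN_ORDER.filter (pvPresent seen_rows) ++ e).contains k = false := by
            cases h : (pvCOLUMN_ORDER.filter (pvPresent seen_rows) ++ e).contains k
            · rfl
            · rcases List.mem_append.mp (List.contains_iff_mem.mp h) with h' | h'
              · exact absurd h' hh0
              · exact absurd h' he
          have hcob : pvCOLUMN_ORDER.contains k = false := by
            cases h : pvCOLUMN_ORDER.contains k
            · rfl
            · exact absurd (List.contains_iff_mem.mp h) hco
          rw [if_neg (by rw [hstart', hmem]; simp)]
          have hp : PySem.Set.contains pres k = false := by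
            cases h : PySem.Set.contains pres k
            · rfl
            · exact absurd ((hinv k).mpr ⟨(PySem.Set.contains_iff pres k).mp h, hstart', hco⟩) he
          rw [if_neg (by rw [hp]; simp), if_pos (by rw [hstart', hcob]; simp)]
          rw [List.append_assoc]
          refine ih hkt _ (e ++ [k]) (fun j => ?_)
          rw [PySem.Set.mem_add]
          simp only [List.mem_append, List.mem_singleton]
          constructor
          · rintro (h | rfl)
            · obtain ⟨h1, h2, h3⟩ := (hinv j).mp h; exact ⟨Or.inl h1, h2, h3⟩
            · exact ⟨Or.inr rfl, hstart', hco⟩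
          · rintro ⟨h | rfl, h2, h3⟩
            · exact Or.inl ((hinv j).mpr ⟨h, h2, h3⟩)
            · exact Or.inr rfl

-- ===== VERDICT (by name: the statement is the Claim_ definition above) =====
theorem merge_header_spec : Claim_equal_merge_header := by
  intro seen_rows _
  show merge_header seen_rows = merge_header_alt seen_rows
  unfold merge_header merge_header_alt
  simp only
  rw [← List.foldl_flatMap, ← List.foldl_flatMap]
  rw [show List.flatMap (fun row => (PySem.Dict.ofList row).keys) seen_rows
        = pvAllKeys seen_rows from rfl]
  rw [show (List.foldl (fun header column =>
        if seen_rows.any (fun row => (PySem.Dict.ofList row).contains column)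
        then header ++ [column] else header) [] pvCOLUMN_ORDER)
      = pvCOLUMN_ORDER.filter (pvPresent seen_rows) ++ [] from
    (PySem.List.foldl_append_if_eq_filter (pvPresent seen_rows) pvCOLUMN_ORDER []).trans
      (by simp)]
  rw [phase2_fold seen_rows (pvAllKeys seen_rows) (fun k hk => hk) PySem.Set.empty []
      (by simp [PySem.Set.empty])]
  congr 1
  apply List.filter_congr
  intro c _
  rw [Bool.eq_iff_iff, PySem.Set.contains_iff,
      pres_fold (pvAllKeys seen_rows) PySem.Set.empty [] c,
      pvPresent_iff_mem_allKeys]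
  simp [PySem.Set.empty]
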